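-- pv_equiv track=rewrite | github.com/Axioforce/axio-common | axio_common/models/calibrator.py | normalize_calibrator_name
-- ===== SOURCE A (Python) =====
-- from typing import Optional
--
-- def normalize_calibrator_name(raw: Optional[str]) -> Optional[str]:
--     """Return the canonical key for a calibrator name, or None when the input
--     is empty/whitespace. Splits on common multi-name separators and uses the
--     first non-empty entry as the key — `'Eric, Sky and Zach'` collapses to
--     `'eric'` so the legacy free-form multi-author strings don't appear as
--     fake calibrators in the rollup. Multi-attribution will move to an M2M
--     junction in a follow-up; this is the conservative first cut."""
--     if not raw:
--         return None
--     s = raw.strip()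
--     if not s:
--         return None
--     # Split on common multi-name separators. ' and ' is hit before ' & ' is
--     # split out by the comma-or-ampersand pass so 'Eric & Zach and Sky'
--     # still collapses to 'Eric'.
--     for sep in (";", ","):
--         if sep in s:
--             s = s.split(sep)[0]
--     # ' and ' / ' & ' are word-boundary separators, not bare splits — guard
--     # against 'Brandon' becoming 'Br' by checking for surrounding spaces.
--     lowered = s.lower()
--     for sep in (" and ", " & "):
--         idx = lowered.find(sep)
--         if idx >= 0:
--             s = s[:idx]
--             lowered = s.lower()
--     key = " ".join(s.split()).lower()
--     return key or None
-- ===== SOURCE B (Python) =====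
-- from typing import Optional
--
-- def normalize_calibrator_name(raw: Optional[str]) -> Optional[str]:
--     """Single-pass character scanner with an accumulator instead of A's staged
--     split/find passes: phase 1 copies characters until it sees ';', ',' or a
--     case-insensitive ' and ' lookahead; phase 2 re-scans that prefix and stops
--     at a ' & ' lookahead.  (The ' & ' scan must run on phase 1's output: in
--     'x & and y' the ' and ' cut removes the trailing space of ' & '.)"""
--     if raw is None:
--         return None
--     s = raw.strip()
--     head = []
--     i = 0
--     while i < len(s):
--         c = s[i]
--         if c == ";" or c == ",":
--             break
--         if s[i:i + 5].lower() == " and ":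
--             break
--         head.append(c)
--         i += 1
--     out = []
--     j = 0
--     while j < len(head):
--         if head[j] == " " and j + 2 < len(head) and head[j + 1] == "&" and head[j + 2] == " ":
--             break
--         out.append(head[j])
--         j += 1
--     key = " ".join("".join(out).split()).lower()
--     return key or None
-- ===== Notes on version B (the rewrite author's own statement) =====
-- stated objective: alternative
-- what changed: A runs staged whole-string passes (split at the punctuation separators, then find-and-slice each word-boundary separator on a recomputed lowered copy); B instead scans character by character with an accumulator: one left-to-right scan copies characters until it reaches a punctuation separator or a five-character case-insensitive word-boundary lookahead, and a second scan cuts that prefix at the ampersand-style lookahead, followed by the same whitespace collapse and lowercasing.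
import Mathlib
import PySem

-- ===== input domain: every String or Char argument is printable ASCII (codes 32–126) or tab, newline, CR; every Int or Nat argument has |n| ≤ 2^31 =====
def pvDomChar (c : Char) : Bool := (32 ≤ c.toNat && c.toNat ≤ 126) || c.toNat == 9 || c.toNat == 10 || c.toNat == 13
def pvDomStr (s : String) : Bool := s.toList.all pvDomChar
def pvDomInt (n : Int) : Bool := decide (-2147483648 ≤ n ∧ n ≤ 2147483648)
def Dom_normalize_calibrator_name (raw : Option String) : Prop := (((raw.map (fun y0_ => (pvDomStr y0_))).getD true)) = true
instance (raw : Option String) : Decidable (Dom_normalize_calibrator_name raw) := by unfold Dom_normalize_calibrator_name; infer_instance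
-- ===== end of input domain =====

-- B replaces A's staged split/find passes by a character-level scanner with an
-- accumulator: one scan copies characters until ';', ',' or a case-insensitive
-- ' and ' lookahead, a second scan cuts the resulting prefix at ' & ';
-- objective: alternative (streaming scan instead of whole-string searches).

-- ===== PORT A =====
def normalize_calibrator_name (raw : Option String) : Option String :=
  match raw with
  | none => none                                   -- 'if not raw' (None is falsy)
  | some r =>
    if r.toList.isEmpty then none                  -- 'if not raw' ('' is falsy)
    else
      let s := PySem.Chars.strip r.toList
      if s.isEmpty then none                       -- 'if not s'
      else
        -- for sep in (";", ","): if sep in s: s = s.split(sep)[0]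
        let s := [[';'], [',']].foldl (fun s sep =>
          if PySem.Chars.isIn sep s then PySem.List.pyGetD (PySem.Chars.splitOn s sep) 0 [] else s) s
        -- lowered = s.lower(); for sep in (" and ", " & "): idx = lowered.find(sep); if idx >= 0: s = s[:idx]; lowered = s.lower()
        let lowered := PySem.Chars.lower s
        let sl := [[' ','a','n','d',' '], [' ','&',' ']].foldl (fun (p : List Char × List Char) sep =>
          let idx := PySem.Chars.find p.2 sep
          if 0 ≤ idx then
            let s' := PySem.List.slice p.1 none (some idx)
            (s', PySem.Chars.lower s')
          else p) (s, lowered)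
        -- key = " ".join(s.split()).lower(); return key or None
        let key := PySem.Chars.lower (PySem.Chars.join [' '] (PySem.Chars.split₀ sl.1))
        if key.isEmpty then none else some (String.ofList key)

-- ===== PORT B =====
/-- Source B's first while loop: copy characters until ';', ',' or a
    case-insensitive ' and ' lookahead (`s[i:i+5].lower() == " and "`). -/
def scanAnd : List Char → List Char
  | [] => []
  | c :: rest =>
    if c = ';' ∨ c = ',' then []
    else if PySem.Chars.lower ((c :: rest).take 5) = [' ','a','n','d',' '] then []
    else c :: scanAnd rest

/-- Source B's second while loop: copy characters until a ' & ' lookahead. -/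
def scanAmp : List Char → List Char
  | [] => []
  | c :: rest =>
    if (c :: rest).take 3 = [' ','&',' '] then []
    else c :: scanAmp rest

def normalize_calibrator_name_alt (raw : Option String) : Option String :=
  match raw with
  | none => none                                   -- 'if raw is None'
  | some r =>
    let s := PySem.Chars.strip r.toList
    let head := scanAnd s
    let out := scanAmp head
    let key := PySem.Chars.lower (PySem.Chars.join [' '] (PySem.Chars.split₀ out))
    if key.isEmpty then none else some (String.ofList key)   -- 'return key or None'

-- ===== PRECONDITION & SPEC =====
def Spec_normalize_calibrator_name (raw : Option String) (out : Option String) : Prop := out = normalize_calibrator_name_alt raw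
instance (raw : Option String) (out : Option String) : Decidable (Spec_normalize_calibrator_name raw out) := by unfold Spec_normalize_calibrator_name; infer_instance

-- ===== CLAIM (what is proved, stated in full; the proofs are below) =====
def Claim_equal_normalize_calibrator_name : Prop := ∀ (raw : Option String), Dom_normalize_calibrator_name raw → Spec_normalize_calibrator_name raw (normalize_calibrator_name raw)

-- ===== LEMMAS AND PROOFS =====

/-- Index of the first occurrence of `sep` in `l` (= `l.length` when none). -/
def occIdx (sep : List Char) : List Char → Nat
  | [] => 0
  | c :: rest => if sep.isPrefixOf (c :: rest) then 0 else occIdx sep rest + 1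

theorem occIdx_le_length (sep l : List Char) : occIdx sep l ≤ l.length := by
  induction l with
  | nil => simp [occIdx]
  | cons c rest ih => simp only [occIdx]; split <;> simp <;> omega

theorem occIdx_spec (sep l : List Char) :
    occIdx sep l = l.length ∨ sep <+: l.drop (occIdx sep l) := by
  induction l with
  | nil => left; rfl
  | cons c rest ih =>
    simp only [occIdx]
    split
    · right; simpa using List.isPrefixOf_iff_prefix.mp (by assumption)
    · rcases ih with h | h
      · left; simp [h]
      · right; simpa using h

theorem occIdx_min (sep l : List Char) : ∀ j < occIdx sep l, ¬ sep <+: l.drop j := by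
  induction l with
  | nil => intro j hj; simp [occIdx] at hj
  | cons c rest ih =>
    intro j hj
    simp only [occIdx] at hj
    split at hj
    · omega
    · match j with
      | 0 =>
        simp only [List.drop_zero]
        intro hp
        exact (by assumption : ¬ sep.isPrefixOf (c :: rest)) (List.isPrefixOf_iff_prefix.mpr hp)
      | j + 1 =>
        simpa using ih j (by omega)

theorem occIdx_of_not_infix (sep l : List Char) (h : ¬ sep <:+: l) : occIdx sep l = l.length := by
  rcases occIdx_spec sep l with h1 | h1
  · exact h1
  · exact absurd (h1.isInfix.trans (List.drop_suffix _ _).isInfix) h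

/-- Uniqueness: anything that is a minimal occurrence position (or the length with no occurrence below it) is occIdx. -/
theorem occIdx_eq (sep l : List Char) (j : Nat) (h1 : sep <+: l.drop j ∨ j = l.length)
    (h2 : ∀ i < j, ¬ sep <+: l.drop i) (h3 : j ≤ l.length) : occIdx sep l = j := by
  rcases lt_trichotomy (occIdx sep l) j with h | h | h
  · rcases occIdx_spec sep l with h' | h'
    · omega
    · exact absurd h' (h2 _ h)
  · exact h
  · rcases h1 with h1 | h1
    · exact absurd h1 (occIdx_min sep l j h)
    · have := occIdx_le_length sep l; omega

/-- `find` in terms of `occIdx`. -/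
theorem find_eq_occIdx (l sub : List Char) :
    PySem.Chars.find l sub = if sub <:+: l then (occIdx sub l : Int) else -1 := by
  split
  · next hin =>
    have h0 : 0 ≤ PySem.Chars.find l sub := (PySem.Chars.find_nonneg_iff l sub).mpr hin
    obtain ⟨hp, hmin⟩ := PySem.Chars.find_spec h0
    have hle := PySem.Chars.find_le_length l sub
    have : occIdx sub l = (PySem.Chars.find l sub).toNat := by
      apply occIdx_eq _ _ _ (Or.inl hp) hmin
      omega
    omega
  · next hin => exact (PySem.Chars.find_eq_neg_one_iff l sub).mpr hin

theorem prefix_drop_take {sep l : List Char} {n j : Nat} :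
    sep <+: (l.take n).drop j ↔ sep <+: l.drop j ∧ sep.length + j ≤ n ∨ sep = [] := by
  constructor
  · intro h
    by_cases hnil : sep = []
    · exact Or.inr hnil
    · left
      have hpos : 0 < sep.length := List.length_pos_iff.mpr hnil
      rw [List.drop_take] at h
      have := List.prefix_take_iff.mp h
      refine ⟨this.1, ?_⟩
      have hlen := this.2
      omega
  · rintro (⟨h1, h2⟩ | h)
    · rw [List.drop_take]
      exact List.prefix_take_iff.mpr ⟨h1, by omega⟩
    · simp [h]

theorem occIdx_take_of_fit (sep l : List Char) (n : Nat) (hne : sep ≠ [])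
    (h : occIdx sep l + sep.length ≤ n) : occIdx sep (l.take n) = occIdx sep l := by
  rcases occIdx_spec sep l with h1 | h1
  · have hlen : 0 < sep.length := List.length_pos_iff.mpr hne
    have : l.take n = l := List.take_of_length_le (by omega)
    rw [this, h1]
  · apply occIdx_eq
    · left; exact prefix_drop_take.mpr (Or.inl ⟨h1, by omega⟩)
    · intro i hi hp
      rcases prefix_drop_take.mp hp with ⟨hp1, _⟩ | hp1
      · exact occIdx_min sep l i hi hp1
      · exact hne hp1
    · simp only [List.length_take]
      have := occIdx_le_length sep l
      omega

theorem occIdx_take_of_ge (sep l : List Char) (n : Nat) (hne : sep ≠ [])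
    (h : n ≤ occIdx sep l) : occIdx sep (l.take n) = (l.take n).length := by
  apply occIdx_eq _ _ _ (Or.inr rfl)
  · intro i hi hp
    rcases prefix_drop_take.mp hp with ⟨hp1, _⟩ | hp1
    · have hlt : i < occIdx sep l := by simp only [List.length_take] at hi; omega
      exact occIdx_min sep l i hlt hp1
    · exact hne hp1
  · omega

/-- Single-character patterns: taking a prefix commutes with occIdx via min. -/
theorem occIdx_take_single (c : Char) (l : List Char) (n : Nat) :
    occIdx [c] (l.take n) = min (occIdx [c] l) ((l.take n).length) := by
  by_cases h : occIdx [c] l < n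
  · rw [occIdx_take_of_fit [c] l n (by simp) (by simp; omega)]
    have := occIdx_le_length [c] l
    simp only [List.length_take]
    omega
  · rw [occIdx_take_of_ge [c] l n (by simp) (by omega)]
    simp only [List.length_take]
    omega

theorem getElem?_of_prefix_drop {sep l : List Char} {j k : Nat} (h : sep <+: l.drop j)
    (hk : k < sep.length) : l[j + k]? = sep[k]? := by
  obtain ⟨t, ht⟩ := h
  rw [← List.getElem?_drop, ← ht, List.getElem?_append_left hk]

-- ===== A-side reduction =====

/-- A's first loop (';' then ',') equals one take at the min position. -/
theorem splitOn_go_acc (sep : List Char) (fuel : Nat) (l cur : List Char) (acc : List (List Char)) :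
    PySem.Chars.splitOn.go sep fuel l cur acc = acc.reverse ++ PySem.Chars.splitOn.go sep fuel l cur [] := by
  induction fuel generalizing l cur acc with
  | zero => simp [PySem.Chars.splitOn.go]
  | succ fuel ih =>
    match l with
    | [] => simp [PySem.Chars.splitOn.go]
    | c :: rest =>
      simp only [PySem.Chars.splitOn.go]
      split
      · rw [ih _ _ (cur.reverse :: acc), ih _ _ ([cur.reverse])]
        simp
      · exact ih _ _ _

theorem splitOn_go_head (sep : List Char) (fuel : Nat) (l cur : List Char)
    (hf : l.length < fuel) :
    (PySem.Chars.splitOn.go sep fuel l cur []).getD 0 [] = cur.reverse ++ l.take (occIdx sep l) := by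
  induction fuel generalizing l cur with
  | zero => omega
  | succ fuel ih =>
    match l with
    | [] => simp [PySem.Chars.splitOn.go, occIdx]
    | c :: rest =>
      simp only [PySem.Chars.splitOn.go]
      split
      · next hpre =>
        rw [splitOn_go_acc]
        simp only [occIdx, hpre, if_pos, List.take_zero, List.append_nil]
        simp
      · next hpre =>
        rw [ih rest (c :: cur) (by simp at hf ⊢; omega)]
        simp [occIdx, hpre]

theorem split_head (sep l : List Char) :
    PySem.List.pyGetD (PySem.Chars.splitOn l sep) 0 [] = l.take (occIdx sep l) := by
  have : PySem.List.pyGetD (PySem.Chars.splitOn l sep) 0 [] = (PySem.Chars.splitOn l sep).getD 0 [] := by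
    simp [PySem.List.pyGetD_zero]
  rw [this, PySem.Chars.splitOn, splitOn_go_head sep _ l [] (by omega)]
  simp

theorem cut_single (c : Char) (l : List Char) :
    (if PySem.Chars.isIn [c] l then PySem.List.pyGetD (PySem.Chars.splitOn l [c]) 0 [] else l)
      = l.take (occIdx [c] l) := by
  split
  · exact split_head [c] l
  · next h =>
    have : ¬ [c] <:+: l := by
      intro hi
      exact h (by simpa [PySem.Chars.isIn_iff_infix])
    rw [occIdx_of_not_infix _ _ this, List.take_length]

theorem lower_take (l : List Char) (n : Nat) :
    PySem.Chars.lower (l.take n) = (PySem.Chars.lower l).take n := by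
  simp [PySem.Chars.lower, List.map_take]

theorem length_lower (l : List Char) : (PySem.Chars.lower l).length = l.length := by
  simp [PySem.Chars.lower]

/-- The straddle argument: an ' and ' occurrence in `lower s` cannot contain a position
    where `s` has a `';'` or `','`; so cutting `take m (lower s)` at ' and ' cuts at
    `min (occIdx " and " (lower s)) m` whenever `m` is `min` of the `';'`/`','` positions. -/
theorem occIdx_and_take (s : List Char) (m : Nat)
    (hm : m = min (occIdx [';'] s) (occIdx [','] s)) :
    occIdx [' ','a','n','d',' '] ((PySem.Chars.lower s).take m)
      = min (occIdx [' ','a','n','d',' '] (PySem.Chars.lower s)) m := by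
  set andP : List Char := [' ','a','n','d',' '] with handP
  set ls := PySem.Chars.lower s with hls
  have hlen : ls.length = s.length := length_lower s
  have hmle : m ≤ s.length := by
    have := occIdx_le_length [';'] s
    have := occIdx_le_length [','] s
    omega
  have hnle := occIdx_le_length andP ls
  by_cases hfit : occIdx andP ls + 5 ≤ m
  · rw [occIdx_take_of_fit andP ls m (by simp [handP]) (by simp [handP]; omega)]
    omega
  · by_cases hge : m ≤ occIdx andP ls
    · rw [occIdx_take_of_ge andP ls m (by simp [handP]) hge]
      simp only [List.length_take]
      omega
    · -- middle zone: occIdx andP ls < m < occIdx andP ls + 5 — impossible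
      exfalso
      set na := occIdx andP ls with hna
      have hocc : andP <+: ls.drop na := by
        rcases occIdx_spec andP ls with h | h
        · omega
        · exact h
      have h5 : na + 5 ≤ ls.length := by
        obtain ⟨t, ht⟩ := hocc
        have : (ls.drop na).length = andP.length + t.length := by rw [← ht]; simp
        simp [handP] at this
        omega
      have hmlt : m < s.length := by omega
      -- s[m] is ';' or ','
      have hchar : s[m]? = some ';' ∨ s[m]? = some ',' := by
        by_cases hc : occIdx [';'] s ≤ occIdx [','] s
        · left
          have h1 : m = occIdx [';'] s := by omega
          have hp : [';'] <+: s.drop m := by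
            rcases occIdx_spec [';'] s with h | h
            · omega
            · rw [h1]; exact h
          have := getElem?_of_prefix_drop hp (k := 0) (by simp)
          simpa using this
        · right
          have h1 : m = occIdx [','] s := by omega
          have hp : [','] <+: s.drop m := by
            rcases occIdx_spec [','] s with h | h
            · omega
            · rw [h1]; exact h
          have := getElem?_of_prefix_drop hp (k := 0) (by simp)
          simpa using this
      -- but ls[m] is a character of " and "
      set k := m - na with hkdef
      have hm' : m = na + k := by omega
      have hk : k < andP.length := by simp [handP]; omega
      have h2 : ls[na + k]? = andP[k]? := getElem?_of_prefix_drop hocc hk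
      have heq : ls[m]? = andP[k]? := by rw [hm']; exact h2
      have hlsm : ls[m]? = (s[m]?).map PySem.Chars.lowerChar := by
        rw [hls]; simp [PySem.Chars.lower, List.getElem?_map]
      have hk1 : 1 ≤ k := by omega
      have hk4 : k < 5 := by omega
      rcases hchar with hc | hc <;>
      · rw [hlsm, hc] at heq
        interval_cases k <;> revert heq <;> simp [handP] <;> decide

/-- A's first loop (';' then ',') is one `take` at the min boundary. -/
theorem stage12 (s : List Char) :
    [[';'], [',']].foldl (fun s sep =>
        if PySem.Chars.isIn sep s then PySem.List.pyGetD (PySem.Chars.splitOn s sep) 0 [] else s) s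
      = s.take (min (occIdx [';'] s) (occIdx [','] s)) := by
  have h1 := occIdx_le_length [';'] s
  have h2 := occIdx_le_length [','] s
  simp only [List.foldl_cons, List.foldl_nil]
  rw [cut_single, cut_single, occIdx_take_single, List.take_take]
  congr 1
  simp only [List.length_take]
  omega

/-- One iteration of A's second loop, on the invariant state `(x, lower x)`. -/
theorem stepA (x sep : List Char) :
    (let idx := PySem.Chars.find (PySem.Chars.lower x) sep
     if 0 ≤ idx then
       let s' := PySem.List.slice x none (some idx)
       (s', PySem.Chars.lower s')
     else (x, PySem.Chars.lower x))
    = (x.take (occIdx sep (PySem.Chars.lower x)),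
       PySem.Chars.lower (x.take (occIdx sep (PySem.Chars.lower x)))) := by
  simp only [find_eq_occIdx]
  by_cases h : sep <:+: PySem.Chars.lower x
  · simp only [h, Int.natCast_nonneg, if_pos, PySem.List.slice_to_natCast]
  · have ho : occIdx sep (PySem.Chars.lower x) = x.length := by
      rw [occIdx_of_not_infix _ _ h, length_lower]
    have hneg : ¬ ((0:Int) ≤ -1) := by norm_num
    simp only [h, if_false, hneg, ho, List.take_length]

/-- Collapsing A's ';'/',' stage and ' and ' stage into one three-way-min take. -/
theorem take_and_stage (s : List Char) :
    (s.take (min (occIdx [';'] s) (occIdx [','] s))).take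
      (occIdx [' ','a','n','d',' ']
        (PySem.Chars.lower (s.take (min (occIdx [';'] s) (occIdx [','] s)))))
    = s.take (min (occIdx [';'] s) (min (occIdx [','] s)
        (occIdx [' ','a','n','d',' '] (PySem.Chars.lower s)))) := by
  rw [lower_take, occIdx_and_take s _ rfl, List.take_take]
  congr 1
  omega

-- ===== B-side characterization =====

/-- `lowerChar` fixes ' ' and '&' and maps nothing else onto them. -/
theorem lowerChar_eq_sym (c d : Char) (hd : d = ' ' ∨ d = '&') :
    PySem.Chars.lowerChar c = d ↔ c = d := by
  constructor
  · intro h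
    unfold PySem.Chars.lowerChar at h
    split at h
    · next hu =>
      exfalso
      unfold PySem.Chars.isupper at hu
      simp only [Bool.and_eq_true, decide_eq_true_eq, Char.le_def] at hu
      have hA : 65 ≤ c.toNat := hu.1
      have hZ : c.toNat ≤ 90 := hu.2
      have hv : (c.toNat + 32).isValidChar := Or.inl (by omega)
      have hofn : (Char.ofNat (c.toNat + 32)).toNat = c.toNat + 32 := by
        simp [Char.ofNat, hv]
      rw [h] at hofn
      rcases hd with hd | hd <;> subst hd <;> simp at hofn <;> omega
    · exact h
  · intro h
    subst h
    rcases hd with hd | hd <;> subst hd <;> decide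

/-- Lowering is invisible to the letter-free pattern ' & '. -/
theorem lower_eq_amp (t : List Char) :
    PySem.Chars.lower t = [' ','&',' '] ↔ t = [' ','&',' '] := by
  match t with
  | [] => simp [PySem.Chars.lower]
  | [a] => simp [PySem.Chars.lower]
  | [a, b] => simp [PySem.Chars.lower]
  | a :: b :: c :: rest =>
    simp [PySem.Chars.lower, lowerChar_eq_sym a ' ' (Or.inl rfl),
      lowerChar_eq_sym b '&' (Or.inr rfl), lowerChar_eq_sym c ' ' (Or.inl rfl)]

/-- ' & ' occurs as a prefix of `lower x` iff it occurs as a prefix of `x`. -/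
theorem amp_prefix_lower (x : List Char) :
    [' ','&',' '] <+: PySem.Chars.lower x ↔ [' ','&',' '] <+: x := by
  rw [List.prefix_iff_eq_take, List.prefix_iff_eq_take]
  have h3 : ([' ','&',' '] : List Char).length = 3 := rfl
  rw [h3, ← lower_take, eq_comm, lower_eq_amp, eq_comm]

/-- Source B's second loop is the take at the first ' & ' position of the lowered prefix. -/
theorem scanAmp_eq (x : List Char) :
    scanAmp x = x.take (occIdx [' ','&',' '] (PySem.Chars.lower x)) := by
  induction x with
  | nil => rfl
  | cons c rest ih =>
    rw [scanAmp]
    have hlc : PySem.Chars.lower (c :: rest) = PySem.Chars.lowerChar c :: PySem.Chars.lower rest := rfl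
    by_cases h : (c :: rest).take 3 = [' ','&',' ']
    · have hp : [' ','&',' '] <+: PySem.Chars.lower (c :: rest) :=
        (amp_prefix_lower _).mpr (List.prefix_iff_eq_take.mpr h.symm)
      have h0 : occIdx [' ','&',' '] (PySem.Chars.lower (c :: rest)) = 0 := by
        rw [hlc]
        simp only [occIdx]
        rw [if_pos (List.isPrefixOf_iff_prefix.mpr (hlc ▸ hp))]
      rw [if_pos h, h0, List.take_zero]
    · have hp : ¬ [' ','&',' '] <+: PySem.Chars.lower (c :: rest) := by
        rw [amp_prefix_lower, List.prefix_iff_eq_take]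
        exact fun hh => h hh.symm
      have h0 : occIdx [' ','&',' '] (PySem.Chars.lower (c :: rest))
          = occIdx [' ','&',' '] (PySem.Chars.lower rest) + 1 := by
        rw [hlc]
        simp only [occIdx]
        rw [if_neg (fun hh => hp (hlc ▸ List.isPrefixOf_iff_prefix.mp hh))]
      rw [if_neg h, h0, List.take_succ_cons, ih]

/-- Source B's first loop is the take at the three-way min boundary. -/
theorem scanAnd_eq (s : List Char) :
    scanAnd s = s.take (min (occIdx [';'] s) (min (occIdx [','] s)
      (occIdx [' ','a','n','d',' '] (PySem.Chars.lower s)))) := by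
  induction s with
  | nil => rfl
  | cons c rest ih =>
    rw [scanAnd]
    have hlc : PySem.Chars.lower (c :: rest) = PySem.Chars.lowerChar c :: PySem.Chars.lower rest := rfl
    by_cases h1 : c = ';' ∨ c = ','
    · have h0 : occIdx [';'] (c :: rest) = 0 ∨ occIdx [','] (c :: rest) = 0 := by
        rcases h1 with h | h <;> subst h
        · left; simp [occIdx, List.isPrefixOf]
        · right; simp [occIdx, List.isPrefixOf]
      have hmin : min (occIdx [';'] (c :: rest)) (min (occIdx [','] (c :: rest))
          (occIdx [' ','a','n','d',' '] (PySem.Chars.lower (c :: rest)))) = 0 := by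
        rcases h0 with h | h <;> omega
      rw [if_pos h1, hmin, List.take_zero]
    · by_cases h2 : PySem.Chars.lower ((c :: rest).take 5) = [' ','a','n','d',' ']
      · have hp : [' ','a','n','d',' '] <+: PySem.Chars.lower (c :: rest) := by
          rw [List.prefix_iff_eq_take]
          have h5 : ([' ','a','n','d',' '] : List Char).length = 5 := rfl
          rw [h5, ← lower_take, h2]
        have h0 : occIdx [' ','a','n','d',' '] (PySem.Chars.lower (c :: rest)) = 0 := by
          rw [hlc]
          simp only [occIdx]
          rw [if_pos (List.isPrefixOf_iff_prefix.mpr (hlc ▸ hp))]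
        rw [if_neg h1, if_pos h2]
        have hmin : min (occIdx [';'] (c :: rest)) (min (occIdx [','] (c :: rest))
            (occIdx [' ','a','n','d',' '] (PySem.Chars.lower (c :: rest)))) = 0 := by omega
        rw [hmin, List.take_zero]
      · have hs1 : occIdx [';'] (c :: rest) = occIdx [';'] rest + 1 := by
          have hnp : ¬ ([';'] : List Char) <+: (c :: rest) := by
            simp only [List.cons_prefix_cons, List.nil_prefix, and_true]
            intro hc; exact h1 (Or.inl hc.symm)
          simp [occIdx, List.isPrefixOf_iff_prefix, hnp]
        have hs2 : occIdx [','] (c :: rest) = occIdx [','] rest + 1 := by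
          have hnp : ¬ ([','] : List Char) <+: (c :: rest) := by
            simp only [List.cons_prefix_cons, List.nil_prefix, and_true]
            intro hc; exact h1 (Or.inr hc.symm)
          simp [occIdx, List.isPrefixOf_iff_prefix, hnp]
        have hs3 : occIdx [' ','a','n','d',' '] (PySem.Chars.lower (c :: rest))
            = occIdx [' ','a','n','d',' '] (PySem.Chars.lower rest) + 1 := by
          have hnp : ¬ [' ','a','n','d',' '] <+: PySem.Chars.lower (c :: rest) := by
            rw [List.prefix_iff_eq_take]
            have h5 : ([' ','a','n','d',' '] : List Char).length = 5 := rfl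
            rw [h5, ← lower_take]
            exact fun hh => h2 hh.symm
          rw [hlc]
          simp only [occIdx]
          rw [if_neg (fun hh => hnp (hlc ▸ List.isPrefixOf_iff_prefix.mp hh))]
        have hmin : min (occIdx [';'] (c :: rest)) (min (occIdx [','] (c :: rest))
            (occIdx [' ','a','n','d',' '] (PySem.Chars.lower (c :: rest))))
            = min (occIdx [';'] rest) (min (occIdx [','] rest)
              (occIdx [' ','a','n','d',' '] (PySem.Chars.lower rest))) + 1 := by
          rw [hs1, hs2, hs3]; omega
        rw [if_neg h1, if_neg h2, hmin, List.take_succ_cons, ih]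

/-- The two pipelines compute the same final prefix. -/
theorem normalize_core (s : List Char) :
    ([[';'], [',']].foldl (fun s sep =>
      if PySem.Chars.isIn sep s then PySem.List.pyGetD (PySem.Chars.splitOn s sep) 0 [] else s) s
     |> fun s2 =>
      ([[' ','a','n','d',' '], [' ','&',' ']].foldl (fun (p : List Char × List Char) sep =>
        let idx := PySem.Chars.find p.2 sep
        if 0 ≤ idx then
          let s' := PySem.List.slice p.1 none (some idx)
          (s', PySem.Chars.lower s')
        else p) (s2, PySem.Chars.lower s2)).1)
    = scanAmp (scanAnd s) := by
  rw [scanAnd_eq, scanAmp_eq]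
  rw [stage12]
  simp only [List.foldl_cons, List.foldl_nil]
  rw [stepA, stepA]
  rw [take_and_stage]

-- ===== VERDICT (by name: the statement is the Claim_ definition above) =====
theorem normalize_calibrator_name_spec : Claim_equal_normalize_calibrator_name := by
  intro raw _
  unfold Spec_normalize_calibrator_name
  match raw with
  | none => rfl
  | some r =>
    have hkey : PySem.Chars.lower (PySem.Chars.join [' ']
        (PySem.Chars.split₀ (scanAmp (scanAnd ([] : List Char))))) = [] := by decide
    simp only [normalize_calibrator_name, normalize_calibrator_name_alt]
    by_cases h1 : r.toList.isEmpty
    · have hs : PySem.Chars.strip r.toList = [] := by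
        rw [List.isEmpty_iff.mp h1]; rfl
      simp [h1, hs, hkey]
    · simp only [h1]
      by_cases h2 : (PySem.Chars.strip r.toList).isEmpty
      · rw [List.isEmpty_iff.mp h2]
        simp [hkey]
      · simp only [h2]
        have := normalize_core (PySem.Chars.strip r.toList)
        simp only at this ⊢
        rw [this]
        simp
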